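-- pv_equiv track=rewrite | github.com/JoJoseph25/NLP_Assignment_17510031 | tom_sawyer_assignment.py | n_def
-- ===== SOURCE A (Python) =====
-- def n_def(x, dictonary):
--     count=0
--     if len(x)==0:
--         count=0
--     else:
--         for i in range(len(x)-1):
--             re_dict=dictonary[x[i]:x[i+1]]
--             for word in re_dict:
--                 if word.isdigit() or word== "Defn":
--                     count+=1
--                 else:
--                     continue
--     return count
-- ===== SOURCE B (Python) =====
-- def n_def(x, dictonary):
--     n = len(dictonary)
--     prefix = [0]
--     s = 0
--     for word in dictonary:
--         if word.isdigit() or word == "Defn":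
--             s += 1
--         prefix.append(s)
--     total = 0
--     for a, b in zip(x, x[1:]):
--         lo, hi, _ = slice(a, b).indices(n)
--         if lo < hi:
--             total += prefix[hi] - prefix[lo]
--     return total
-- ===== Notes on version B (the rewrite author's own statement) =====
-- stated objective: faster
-- what changed: Replaces the per-pair slice-and-scan of the dictionary with a prefix-sum array of digit/'Defn' flags built once, answering each x[i]:x[i+1] slice count as a difference of two prefix values after Python's slice-index clamping.
import Mathlib
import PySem

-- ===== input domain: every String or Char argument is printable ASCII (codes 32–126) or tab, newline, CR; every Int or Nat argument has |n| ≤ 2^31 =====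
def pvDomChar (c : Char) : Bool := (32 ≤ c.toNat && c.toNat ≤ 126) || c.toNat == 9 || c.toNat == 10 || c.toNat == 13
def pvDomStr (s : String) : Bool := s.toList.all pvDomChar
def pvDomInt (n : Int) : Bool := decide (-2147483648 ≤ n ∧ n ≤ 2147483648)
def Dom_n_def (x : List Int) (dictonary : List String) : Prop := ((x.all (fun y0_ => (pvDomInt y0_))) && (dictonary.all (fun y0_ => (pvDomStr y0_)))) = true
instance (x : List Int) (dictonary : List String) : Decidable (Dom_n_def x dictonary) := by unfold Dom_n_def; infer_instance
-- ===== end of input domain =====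

-- B replaces A's per-pair slice-and-scan with a prefix-sum array of digit/"Defn" flags built once,
-- answering each x[i]:x[i+1] slice count as a difference of two prefix values (objective: faster, asymptotic).

-- ===== PORT A =====
def n_def (x : List Int) (dictonary : List String) : Int :=
  let count : Int := 0
  if PySem.List.len x == 0 then
    count
  else
    (PySem.List.pyRange 0 (PySem.List.len x - 1) 1).foldl
      (fun count i =>
        let re_dict := PySem.List.slice dictonary (some (PySem.List.pyGetD x i 0)) (some (PySem.List.pyGetD x (i + 1) 0))
        re_dict.foldl
          (fun count word =>
            if PySem.Str.strIsdigit word || word == "Defn" then count + 1 else count)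
          count)
      count

-- ===== PORT B =====
def n_def_alt (x : List Int) (dictonary : List String) : Int :=
  let n := dictonary.length
  -- prefix[k] = number of flagged words among the first k dictionary entries
  let sp := dictonary.foldl
    (fun (acc : Int × List Int) word =>
      let s := if PySem.Str.strIsdigit word || word == "Defn" then acc.1 + 1 else acc.1
      (s, acc.2 ++ [s]))
    (0, ([0] : List Int))
  let pre := sp.2
  (x.zip (PySem.List.slice x (some 1) none)).foldl
    (fun total ab =>
      let lo := PySem.List.clampIdx n ab.1   -- slice(a, b).indices(n)
      let hi := PySem.List.clampIdx n ab.2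
      if lo < hi then total + (pre.getD hi 0 - pre.getD lo 0) else total)
    0

-- ===== PRECONDITION & SPEC =====
def Spec_n_def (x : List Int) (dictonary : List String) (out : Int) : Prop := out = n_def_alt x dictonary
instance (x : List Int) (dictonary : List String) (out : Int) : Decidable (Spec_n_def x dictonary out) := by unfold Spec_n_def; infer_instance

-- ===== CLAIM (what is proved, stated in full; the proofs are below) =====
def Claim_equal_n_def : Prop := ∀ (x : List Int) (dictonary : List String), Dom_n_def x dictonary → Spec_n_def x dictonary (n_def x dictonary)

-- ===== LEMMAS AND PROOFS =====

-- the flag both programs test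
def pFlag (w : String) : Bool := PySem.Str.strIsdigit w || w == "Defn"

lemma prefix_fold (ds : List String) (s0 : Int) (acc : List Int) :
    ds.foldl
      (fun (a : Int × List Int) word =>
        let s := if PySem.Str.strIsdigit word || word == "Defn" then a.1 + 1 else a.1
        (s, a.2 ++ [s])) (s0, acc)
    = (s0 + ds.countP pFlag,
       acc ++ (List.range ds.length).map (fun k => s0 + ((ds.take (k + 1)).countP pFlag : Int))) := by
  induction ds generalizing s0 acc with
  | nil => simp
  | cons d t ih =>
    simp only [List.foldl_cons, ih, List.countP_cons, List.length_cons,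
      List.range_succ_eq_map, List.map_cons, List.map_map]
    simp only [Prod.mk.injEq]
    refine ⟨?_, ?_⟩
    · simp only [pFlag]; split_ifs <;> push_cast <;> ring
    · rw [List.append_assoc, List.singleton_append]
      congr 1
      congr 1
      · simp only [pFlag, List.take_succ_cons, List.take_zero, List.countP_cons, List.countP_nil]
        split_ifs <;> push_cast <;> ring
      · apply List.map_congr_left
        intro k _
        simp only [Function.comp_apply, List.take_succ_cons, List.countP_cons, pFlag]
        split_ifs <;> push_cast <;> ring

lemma pre_getD (ds : List String) (k : Nat) (hk : k ≤ ds.length) :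
    (([(0 : Int)] ++ (List.range ds.length).map (fun j => ((ds.take (j + 1)).countP pFlag : Int))).getD k 0)
    = ((ds.take k).countP pFlag : Int) := by
  cases k with
  | zero => simp
  | succ j =>
    have hj : j < ds.length := by omega
    simp [List.getD, hj]

lemma countP_take_sub (ds : List String) (lo hi : Nat) (h : lo ≤ hi) :
    (((ds.drop lo).take (hi - lo)).countP pFlag : Int)
    = ((ds.take hi).countP pFlag : Int) - ((ds.take lo).countP pFlag : Int) := by
  have hsplit : ds.take hi = ds.take lo ++ (ds.drop lo).take (hi - lo) := by
    have : hi = lo + (hi - lo) := by omega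
    rw [this, List.take_add]; simp
  rw [hsplit, List.countP_append]
  push_cast; ring

lemma seg_eq (ds : List String) (a b : Int) :
    (if PySem.List.clampIdx ds.length a < PySem.List.clampIdx ds.length b then
       (([(0 : Int)] ++ (List.range ds.length).map (fun j => ((ds.take (j + 1)).countP pFlag : Int))).getD (PySem.List.clampIdx ds.length b) 0)
       - (([(0 : Int)] ++ (List.range ds.length).map (fun j => ((ds.take (j + 1)).countP pFlag : Int))).getD (PySem.List.clampIdx ds.length a) 0)
     else 0)
    = ((PySem.List.slice ds (some a) (some b)).countP pFlag : Int) := by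
  have hslice : PySem.List.slice ds (some a) (some b)
      = (ds.drop (PySem.List.clampIdx ds.length a)).take (PySem.List.clampIdx ds.length b - PySem.List.clampIdx ds.length a) := by
    simp [PySem.List.slice]
  rw [hslice]
  set lo := PySem.List.clampIdx ds.length a with hlo
  set hi := PySem.List.clampIdx ds.length b with hhi
  by_cases h : lo < hi
  · rw [if_pos h, pre_getD ds hi (PySem.List.clampIdx_le _ _), pre_getD ds lo (PySem.List.clampIdx_le _ _),
      countP_take_sub ds lo hi (by omega)]
  · rw [if_neg h]
    have : hi - lo = 0 := by omega
    simp [this]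

lemma zip_tail_eq (x : List Int) :
    x.zip x.tail = (List.range (x.length - 1)).map (fun k => (x.getD k 0, x.getD (k + 1) 0)) := by
  apply List.ext_getElem
  · simp only [List.length_zip, List.length_tail, List.length_map, List.length_range]; omega
  · intro i h1 h2
    have hi : i < x.length - 1 := by simpa using h2
    have hi1 : i < x.length := by omega
    have hi2 : i + 1 < x.length := by omega
    have ht : i < x.tail.length := by simp [List.length_tail]; omega
    simp [List.getElem_zip, List.getElem_tail, hi1, hi2]

lemma A_sum (x : List Int) (dic : List String) (hx : x ≠ []) :
    n_def x dic
    = ((List.range (x.length - 1)).map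
        (fun k => ((PySem.List.slice dic (some (x.getD k 0)) (some (x.getD (k + 1) 0))).countP pFlag : Int))).sum := by
  have hlen : x.length ≠ 0 := by simpa using hx
  simp only [n_def, PySem.List.len_eq]
  rw [if_neg (by simpa using hlen)]
  have hbody : ∀ (c : Int) (i : Int),
      (PySem.List.slice dic (some (PySem.List.pyGetD x i 0)) (some (PySem.List.pyGetD x (i + 1) 0))).foldl
        (fun count word => if PySem.Str.strIsdigit word || word == "Defn" then count + 1 else count) c
      = c + ((PySem.List.slice dic (some (PySem.List.pyGetD x i 0)) (some (PySem.List.pyGetD x (i + 1) 0))).countP pFlag : Int) := by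
    intro c i
    exact PySem.List.foldl_if_add_one pFlag _ _
  simp only [hbody]
  rw [PySem.List.foldl_add]
  rw [PySem.List.pyRange_one]
  simp only [List.map_map]
  have hcast : ((x.length : Int) - 1 - 0).toNat = x.length - 1 := by omega
  rw [hcast]
  simp only [zero_add]
  congr 1
  apply List.map_congr_left
  intro k hk
  simp only [Function.comp_apply]
  rw [show ((k : Int) + 1) = ((k + 1 : Nat) : Int) by push_cast; ring]
  rw [PySem.List.pyGetD_natCast, PySem.List.pyGetD_natCast]

set_option maxRecDepth 8192 in
lemma B_sum (x : List Int) (dic : List String) :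
    n_def_alt x dic
    = ((x.zip x.tail).map
        (fun ab => ((PySem.List.slice dic (some ab.1) (some ab.2)).countP pFlag : Int))).sum := by
  simp only [n_def_alt, PySem.List.slice_from_one]
  rw [prefix_fold]
  have hbody : ∀ (t : Int) (ab : Int × Int),
      (if PySem.List.clampIdx dic.length ab.1 < PySem.List.clampIdx dic.length ab.2 then
        t + ((((0 : Int) + dic.countP pFlag, [(0:Int)] ++ (List.range dic.length).map (fun k => (0:Int) + ((dic.take (k + 1)).countP pFlag : Int))).2).getD (PySem.List.clampIdx dic.length ab.2) 0
             - (((0 : Int) + dic.countP pFlag, [(0:Int)] ++ (List.range dic.length).map (fun k => (0:Int) + ((dic.take (k + 1)).countP pFlag : Int))).2).getD (PySem.List.clampIdx dic.length ab.1) 0)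
       else t)
      = t + ((PySem.List.slice dic (some ab.1) (some ab.2)).countP pFlag : Int) := by
    intro t ab
    have := seg_eq dic ab.1 ab.2
    simp only [zero_add] at *
    split_ifs with h
    · rw [if_pos h] at this; omega
    · rw [if_neg h] at this; omega
  calc (x.zip x.tail).foldl
        (fun total ab =>
          if PySem.List.clampIdx dic.length ab.1 < PySem.List.clampIdx dic.length ab.2 then
            total + ((((0 : Int) + dic.countP pFlag, [(0:Int)] ++ (List.range dic.length).map (fun k => (0:Int) + ((dic.take (k + 1)).countP pFlag : Int))).2).getD (PySem.List.clampIdx dic.length ab.2) 0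
                 - (((0 : Int) + dic.countP pFlag, [(0:Int)] ++ (List.range dic.length).map (fun k => (0:Int) + ((dic.take (k + 1)).countP pFlag : Int))).2).getD (PySem.List.clampIdx dic.length ab.1) 0)
          else total) 0
      = (x.zip x.tail).foldl (fun total ab => total + ((PySem.List.slice dic (some ab.1) (some ab.2)).countP pFlag : Int)) 0 := by
        apply PySem.List.foldl_congr_mem
        intro acc ab _
        exact hbody acc ab
    _ = _ := by rw [PySem.List.foldl_add]; simp

-- ===== VERDICT (by name: the statement is the Claim_ definition above) =====
theorem n_def_spec : Claim_equal_n_def := by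
  intro x dic _
  unfold Spec_n_def
  by_cases hx : x = []
  · subst hx; simp [n_def, n_def_alt, PySem.List.len_eq]
  · rw [A_sum x dic hx, B_sum x dic, zip_tail_eq x, List.map_map]
    congr 1
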